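-- pv_equiv track=rewrite | github.com/yacoublambaz/EECE230PssSpring2022 | mar1st.py | longestUnbrokenSublist
-- ===== SOURCE A (Python) =====
-- def isUnbroken(L):
--     for i in range(1,len(L)):
--         if abs(L[i-1] - L[i]) > 1:
--             return False
--     return True
--
-- def longestUnbrokenSublist(L):
--     longestLen = 0
--     longestSubL = []
--     for i in range(len(L)):
--         for j in range(i,len(L)):
--             subL = L[i:j+1]
--             if isUnbroken(subL):
--                 if len(subL) > longestLen:
--                     longestLen = len(subL)
--                     longestSubL = subL
--     return longestSubL
-- ===== SOURCE B (Python) =====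
-- def longestUnbrokenSublist(L):
--     best = []
--     i = 0
--     n = len(L)
--     while i < n:
--         j = i + 1
--         while j < n and abs(L[j - 1] - L[j]) <= 1:
--             j += 1
--         if j - i > len(best):
--             best = L[i:j]
--         i = j
--     return best
-- ===== Notes on version B (the rewrite author's own statement) =====
-- stated objective: faster
-- what changed: B replaces A's enumeration of all O(n^2) sublists (each re-checked element by element) with a single left-to-right two-pointer pass over maximal unbroken runs, keeping the first longest run.
import Mathlib
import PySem

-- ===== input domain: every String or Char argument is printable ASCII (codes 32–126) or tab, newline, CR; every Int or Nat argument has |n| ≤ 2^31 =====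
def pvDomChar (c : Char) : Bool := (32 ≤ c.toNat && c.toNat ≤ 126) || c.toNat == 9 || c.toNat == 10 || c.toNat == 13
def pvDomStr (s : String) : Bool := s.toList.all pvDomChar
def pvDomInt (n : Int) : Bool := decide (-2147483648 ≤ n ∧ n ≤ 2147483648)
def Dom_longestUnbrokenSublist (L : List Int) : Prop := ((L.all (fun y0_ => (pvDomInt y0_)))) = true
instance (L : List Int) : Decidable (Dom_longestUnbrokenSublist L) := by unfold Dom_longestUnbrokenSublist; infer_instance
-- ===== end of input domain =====

-- B replaces A's O(n^3) scan of all sublists by a single left-to-right pass over maximal runs (keeping the first longest); equivalence of return values is proved below.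

-- ===== PORT A =====
-- helper isUnbroken: the Python index loop with early return, as the obvious structural recursion
def isUnbroken : List Int → Bool
  | [] => true
  | [_] => true
  | a :: b :: t => if (a - b).natAbs > 1 then false else isUnbroken (b :: t)

def longestUnbrokenSublist (L : List Int) : List Int :=
  (((PySem.List.pyRange 0 (L.length) 1).foldl (fun (s : Nat × List Int) i =>
    (PySem.List.pyRange i (L.length) 1).foldl (fun (s : Nat × List Int) j =>
      let subL := PySem.List.slice L (some i) (some (j + 1))
      if isUnbroken subL = true then
        if subL.length > s.1 then (subL.length, subL) else s
      else s) s) ((0 : Nat), ([] : List Int)))).2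

-- ===== PORT B =====
-- inner while of Source B: scan forward while adjacent diff ≤ 1; returns (extra run length, rest of list)
def advanceRun (prev : Int) : List Int → Nat × List Int
  | [] => (0, [])
  | x :: t =>
      if (prev - x).natAbs ≤ 1 then
        let p := advanceRun x t
        (p.1 + 1, p.2)
      else (0, x :: t)

theorem advanceRun_snd_length (prev : Int) (t : List Int) :
    (advanceRun prev t).2.length ≤ t.length := by
  induction t generalizing prev with
  | nil => simp [advanceRun]
  | cons x t ih =>
      simp only [advanceRun]
      split
      · exact le_trans (ih x) (Nat.le_succ _)
      · simp

-- outer while of Source B: one pass over the runs, keeping the first longest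
def bGo : List Int → List Int → List Int
  | [], best => best
  | x :: t, best =>
      let p := advanceRun x t
      bGo p.2 (if p.1 + 1 > best.length then x :: t.take p.1 else best)
termination_by T _ => T.length
decreasing_by
  simpa using Nat.lt_succ_of_le (advanceRun_snd_length x t)

def longestUnbrokenSublist_alt (L : List Int) : List Int := bGo L []

-- ===== PRECONDITION & SPEC =====
def Spec_longestUnbrokenSublist (L : List Int) (out : List Int) : Prop := out = longestUnbrokenSublist_alt L
instance (L : List Int) (out : List Int) : Decidable (Spec_longestUnbrokenSublist L out) := by unfold Spec_longestUnbrokenSublist; infer_instance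

-- ===== CLAIM (what is proved, stated in full; the proofs are below) =====
def Claim_equal_longestUnbrokenSublist : Prop := ∀ (L : List Int), Dom_longestUnbrokenSublist L → Spec_longestUnbrokenSublist L (longestUnbrokenSublist L)

-- ===== LEMMAS AND PROOFS =====

-- length of the maximal unbroken run at the head of a list
def rlen : List Int → Nat
  | [] => 0
  | x :: t => (advanceRun x t).1 + 1

theorem advanceRun_fst_le (prev : Int) (t : List Int) :
    (advanceRun prev t).1 ≤ t.length := by
  induction t generalizing prev with
  | nil => simp [advanceRun]
  | cons x t ih =>
      simp only [advanceRun]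
      split
      · have := ih x; simp; omega
      · simp

theorem advanceRun_snd_eq_drop (prev : Int) (t : List Int) :
    (advanceRun prev t).2 = t.drop (advanceRun prev t).1 := by
  induction t generalizing prev with
  | nil => simp [advanceRun]
  | cons x t ih =>
      simp only [advanceRun]
      split
      · simpa using ih x
      · simp

theorem rlen_le_length (T : List Int) : rlen T ≤ T.length := by
  cases T with
  | nil => simp [rlen]
  | cons x t => have := advanceRun_fst_le x t; simp [rlen]; omega

theorem rlen_pos (x : Int) (t : List Int) : 1 ≤ rlen (x :: t) := by
  simp [rlen]

theorem unb_take (t : List Int) (x : Int) (m : Nat) :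
    isUnbroken ((x :: t).take (m + 1)) = true ↔
      min (m + 1) (t.length + 1) ≤ (advanceRun x t).1 + 1 := by
  induction t generalizing x m with
  | nil =>
      simp [isUnbroken, advanceRun, List.take]
  | cons y t ih =>
      cases m with
      | zero => simp [isUnbroken, List.take]
      | succ m =>
          simp only [List.take_succ_cons, isUnbroken, advanceRun]
          by_cases hxy : (x - y).natAbs ≤ 1
          · have h2 : ¬ (x - y).natAbs > 1 := by omega
            simp only [hxy, if_true, h2, if_false]
            rw [← List.take_succ_cons]
            rw [ih y m]
            simp only [List.length_cons]
            omega
          · have h2 : (x - y).natAbs > 1 := by omega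
            simp only [hxy, if_false, h2, if_true]
            simp only [List.length_cons]
            constructor
            · intro h; exact absurd h (by simp)
            · intro h; omega

theorem unb_take_of_le {T : List Int} {m : Nat} (h : m + 1 ≤ rlen T) :
    isUnbroken (T.take (m + 1)) = true := by
  cases T with
  | nil => simp [rlen] at h
  | cons x t =>
      rw [unb_take]
      simp only [rlen] at h
      omega

theorem unb_take_of_gt {T : List Int} {m : Nat} (h1 : rlen T < m + 1) (h2 : m + 1 ≤ T.length) :
    isUnbroken (T.take (m + 1)) = false := by
  cases T with
  | nil => simp at h2
  | cons x t =>
      have := (unb_take t x m)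
      simp only [rlen] at h1
      simp only [List.length_cons] at h2
      rcases Bool.eq_false_or_eq_true (isUnbroken ((x :: t).take (m + 1))) with ht | hf
      · rw [this] at ht; omega
      · exact hf

theorem rlen_drop (T : List Int) (d : Nat) (h : d < rlen T) :
    rlen (T.drop d) = rlen T - d := by
  induction T generalizing d with
  | nil => simp [rlen] at h
  | cons x t ih =>
      cases d with
      | zero => simp
      | succ d =>
          simp only [rlen] at h
          have hpos : 1 ≤ (advanceRun x t).1 := by omega
          have hrt : rlen t = (advanceRun x t).1 := by
            cases t with
            | nil => simp [advanceRun] at hpos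
            | cons y t' =>
                simp only [advanceRun] at hpos ⊢
                by_cases hxy : (x - y).natAbs ≤ 1
                · simp only [hxy, if_true] at hpos ⊢
                  simp [rlen]
                · simp [hxy] at hpos
          simp only [List.drop_succ_cons]
          rw [ih d (by rw [hrt]; omega), hrt]
          simp only [rlen]
          omega

-- A's inner j-loop, abstracted over T = L.drop i
def innerF (T : List Int) (s : Nat × List Int) : Nat × List Int :=
  (List.range T.length).foldl (fun s k =>
    let u := T.take (k + 1)
    if isUnbroken u = true then
      if u.length > s.1 then (u.length, u) else s
    else s) s

theorem foldl_fix {α β : Type} (l : List α) (f : β → α → β) (s : β)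
    (h : ∀ x ∈ l, f s x = s) : l.foldl f s = s := by
  induction l with
  | nil => rfl
  | cons x t ih =>
      simp only [List.foldl_cons, h x (by simp)]
      exact ih (fun y hy => h y (by simp [hy]))

theorem inner_ratchet (T : List Int) (q : Nat) (s : Nat × List Int)
    (hq : q ≤ rlen T) :
    (List.range q).foldl (fun s k =>
      let u := T.take (k + 1)
      if isUnbroken u = true then
        if u.length > s.1 then (u.length, u) else s
      else s) s = if s.1 < q then (q, T.take q) else s := by
  induction q with
  | zero => simp
  | succ q ih =>
      have hq' : q ≤ rlen T := by omega
      have hrl := rlen_le_length T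
      have hlen : (T.take (q + 1)).length = q + 1 := by
        simp [List.length_take]; omega
      rw [List.range_succ, List.foldl_append, ih hq']
      simp only [List.foldl_cons, List.foldl_nil]
      simp only [unb_take_of_le hq, if_true, hlen]
      split_ifs <;> first | rfl | omega

theorem inner_eq (T : List Int) (s : Nat × List Int) :
    innerF T s = if s.1 < rlen T then (rlen T, T.take (rlen T)) else s := by
  have hr := rlen_le_length T
  unfold innerF
  rw [show T.length = rlen T + (T.length - rlen T) by omega, List.range_add,
      List.foldl_append, inner_ratchet T (rlen T) s le_rfl]
  apply foldl_fix
  intro k hk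
  simp only [List.mem_map, List.mem_range] at hk
  obtain ⟨k', hk', rfl⟩ := hk
  have hb : isUnbroken (T.take (rlen T + k' + 1)) = false :=
    unb_take_of_gt (by omega) (by omega)
  simp [hb]

-- A's outer loop collapsed to a recursion over maximal runs
def goA : List Int → Nat × List Int → Nat × List Int
  | [], s => s
  | x :: t, s =>
      goA ((x :: t).drop (rlen (x :: t)))
          (if s.1 < rlen (x :: t) then (rlen (x :: t), (x :: t).take (rlen (x :: t))) else s)
termination_by T _ => T.length
decreasing_by
  have := rlen_pos x t
  simp only [List.length_drop, List.length_cons]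
  omega

theorem outer_eq (T : List Int) (s : Nat × List Int) :
    (List.range T.length).foldl (fun s k => innerF (T.drop k) s) s = goA T s := by
  induction T, s using goA.induct with
  | case1 s => simp [goA]
  | case2 x t s ih =>
      have hr1 : 1 ≤ rlen (x :: t) := rlen_pos x t
      have hrl : rlen (x :: t) ≤ (x :: t).length := rlen_le_length (x :: t)
      rw [show (x :: t).length = rlen (x :: t) + ((x :: t).length - rlen (x :: t)) by omega,
          List.range_add, List.foldl_append]
      have hfirst : (List.range (rlen (x :: t))).foldl (fun s k => innerF ((x :: t).drop k) s) s
          = (if s.1 < rlen (x :: t) then (rlen (x :: t), (x :: t).take (rlen (x :: t))) else s) := by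
        have hsplit : List.range (rlen (x :: t)) = 0 :: (List.range (rlen (x :: t) - 1)).map (1 + ·) := by
          conv_lhs => rw [show rlen (x :: t) = 1 + (rlen (x :: t) - 1) by omega]
          rw [List.range_add]
          simp
        rw [hsplit]
        simp only [List.foldl_cons, List.drop_zero]
        rw [inner_eq]
        apply foldl_fix
        intro k hk
        simp only [List.mem_map, List.mem_range] at hk
        obtain ⟨k', hk', rfl⟩ := hk
        rw [inner_eq, rlen_drop (x :: t) (1 + k') (by omega)]
        have hno : ¬ ((if s.1 < rlen (x :: t) then (rlen (x :: t), (x :: t).take (rlen (x :: t))) else s).1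
            < rlen (x :: t) - (1 + k')) := by
          split_ifs with h
          · simp
          · simp
            omega
        simp [hno]
      rw [hfirst, List.foldl_map]
      have hdd : ∀ k : Nat, (x :: t).drop (rlen (x :: t) + k) = ((x :: t).drop (rlen (x :: t))).drop k := by
        intro k; rw [List.drop_drop]
      have hlen2 : ((x :: t).drop (rlen (x :: t))).length = (x :: t).length - rlen (x :: t) := by
        simp
      simp only [hdd]
      rw [← hlen2]
      simp only [dite_eq_ite] at ih
      rw [ih]
      conv_rhs => rw [goA]

theorem goA_eq_bGo (T : List Int) (b : List Int) :
    goA T (b.length, b) = ((bGo T b).length, bGo T b) := by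
  cases T with
  | nil => simp [goA, bGo]
  | cons x t =>
      have hadv := advanceRun_fst_le x t
      have hrest := advanceRun_snd_eq_drop x t
      rw [goA, bGo]
      have hrlen : rlen (x :: t) = (advanceRun x t).1 + 1 := rfl
      have htake : (x :: t).take (rlen (x :: t)) = x :: t.take (advanceRun x t).1 := by
        rw [hrlen, List.take_succ_cons]
      have hdrop : (x :: t).drop (rlen (x :: t)) = (advanceRun x t).2 := by
        rw [hrlen, List.drop_succ_cons, hrest]
      rw [htake, hdrop, hrlen]
      by_cases hc : (advanceRun x t).1 + 1 > b.length
      · have h1 : b.length < (advanceRun x t).1 + 1 := hc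
        have hlt : (x :: t.take (advanceRun x t).1).length = (advanceRun x t).1 + 1 := by
          simp [List.length_take]; omega
        rw [if_pos h1, if_pos hc, ← hlt]
        exact goA_eq_bGo (advanceRun x t).2 (x :: t.take (advanceRun x t).1)
      · have h1 : ¬ b.length < (advanceRun x t).1 + 1 := hc
        rw [if_neg h1, if_neg hc]
        exact goA_eq_bGo (advanceRun x t).2 b
termination_by T.length
decreasing_by
  all_goals
    have := advanceRun_snd_length x t
    simp only [List.length_cons]
    omega

theorem portA_eq (L : List Int) :
    longestUnbrokenSublist L =
      ((List.range L.length).foldl (fun s k => innerF (L.drop k) s) ((0 : Nat), ([] : List Int))).2 := by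
  have hslice : ∀ (k j : Nat),
      PySem.List.slice L (some (k : Int)) (some ((k : Int) + (j : Int) + 1)) = (L.drop k).take (j + 1) := by
    intro k j
    have h : (k : Int) + (j : Int) + 1 = (k : Int) + ((j + 1 : Nat) : Int) := by push_cast; ring
    rw [h, PySem.List.slice_natCast_add]
  have hstep : ∀ (s : Nat × List Int) (k : Nat),
      (PySem.List.pyRange (k : Int) (L.length : Int) 1).foldl (fun (s : Nat × List Int) j =>
        let subL := PySem.List.slice L (some (k : Int)) (some (j + 1))
        if isUnbroken subL = true then
          if subL.length > s.1 then (subL.length, subL) else s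
        else s) s = innerF (L.drop k) s := by
    intro s k
    rw [PySem.List.pyRange_one, List.foldl_map]
    have hto : ((L.length : Int) - (k : Int)).toNat = (L.drop k).length := by
      simp [List.length_drop]
    rw [hto]
    unfold innerF
    apply List.foldl_ext
    intro s' j _
    simp only [hslice k j]
  unfold longestUnbrokenSublist
  congr 1
  rw [PySem.List.pyRange_zero_nat, List.foldl_map]
  simp only [hstep]

-- ===== VERDICT (by name: the statement is the Claim_ definition above) =====
theorem longestUnbrokenSublist_spec : Claim_equal_longestUnbrokenSublist := by
  intro L _
  unfold Spec_longestUnbrokenSublist longestUnbrokenSublist_alt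
  rw [portA_eq, outer_eq]
  have h := goA_eq_bGo L []
  simp only [List.length_nil] at h
  rw [h]
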